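-- pv_equiv track=rewrite | github.com/twlee79/dna_mnemonic | dna_mnemonic/dna_mnemonic.py | up2bit_decode
-- ===== SOURCE A (Python) =====
-- def up2bit_decode(up2bit_value):
--     result = []
--     total_bits = up2bit_value.bit_length()
--     if total_bits%2 != 1:
--       raise Exception("expect odd number of bits in up2bit encoding")
--     mask = 0x03
--     remaining_bits = up2bit_value
--     twobit = None
--     while remaining_bits!=0:
--       twobit = remaining_bits&mask
--       char = ('A','C','T','G')[twobit]
--       remaining_bits = remaining_bits>>2
--       result.append(char)
--     if twobit!=1:
--       raise Exception(f"Expecting a cap of 0b01, but got {twobit}")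
--       # odd number of bits check should prevent us getting here, but worth checking
--     result.pop() # pop cap
--     return "".join(result)
-- ===== SOURCE B (Python) =====
-- def up2bit_decode(up2bit_value):
--     total_bits = up2bit_value.bit_length()
--     if total_bits % 2 != 1:
--         raise Exception("expect odd number of bits in up2bit encoding")
--     # cap bit sits at position total_bits-1; the total_bits//2 payload groups below it
--     return "".join(('A', 'C', 'T', 'G')[(up2bit_value >> (2 * i)) & 3]
--                    for i in range(total_bits // 2))
-- ===== Notes on version B (the rewrite author's own statement) =====
-- stated objective: alternative
-- what changed: B replaces A's shift-until-zero loop with append/pop and a runtime cap check by computing the group count directly from bit_length and mapping the 2-bit payload groups in one comprehension (the cap is provably 1 when the bit length is odd, so it is never materialised or popped).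
import Mathlib
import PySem

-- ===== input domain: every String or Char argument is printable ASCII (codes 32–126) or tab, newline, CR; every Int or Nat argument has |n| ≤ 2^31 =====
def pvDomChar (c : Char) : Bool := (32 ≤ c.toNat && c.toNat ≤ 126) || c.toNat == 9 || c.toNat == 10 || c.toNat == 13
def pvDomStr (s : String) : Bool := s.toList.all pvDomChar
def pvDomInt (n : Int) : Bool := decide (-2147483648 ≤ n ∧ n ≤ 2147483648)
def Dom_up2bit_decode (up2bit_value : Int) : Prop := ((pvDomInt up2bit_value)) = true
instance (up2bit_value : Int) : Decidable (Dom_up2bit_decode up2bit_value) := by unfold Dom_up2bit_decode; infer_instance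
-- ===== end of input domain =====

-- B replaces A's shift-until-zero loop (append + final pop of the cap) by a closed group
-- count from bit_length and a direct comprehension over the payload groups; equivalence is
-- about the RETURN value on inputs where A terminates normally (Pre_).

-- ('A','C','T','G')[twobit] — the tuple lookup both Pythons contain; twobit = r & 3 ∈ {0,1,2,3}
def nucleotide (t : Int) : Char :=
  if t = 0 then 'A' else if t = 1 then 'C' else if t = 2 then 'T' else 'G'

-- ===== PORT A =====
-- A's 'while remaining_bits != 0' loop; fuel makes it total (Python diverges on negative
-- inputs with odd bit length — outside Pre_); state = (result, twobit)
def up2bitLoopA : Nat → Int → List Char → Option Int → (List Char × Option Int)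
  | 0, _, result, twobit => (result, twobit)
  | fuel + 1, r, result, twobit =>
    if r ≠ 0 then
      let t := PySem.Int.band r 3
      up2bitLoopA fuel (r >>> (2 : Nat)) (result ++ [nucleotide t]) (some t)
    else (result, twobit)

def up2bit_decode (up2bit_value : Int) : String :=
  let total_bits := PySem.Int.bitLength up2bit_value
  if total_bits % 2 ≠ 1 then ""   -- raise Exception("expect odd number of bits …")
  else
    let st := up2bitLoopA (total_bits / 2 + 2) up2bit_value [] none
    if st.2 ≠ some 1 then ""      -- raise Exception("Expecting a cap of 0b01 …")
    else String.ofList st.1.dropLast  -- result.pop(); "".join(result)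

-- ===== PORT B =====
def up2bit_decode_alt (up2bit_value : Int) : String :=
  let total_bits := PySem.Int.bitLength up2bit_value
  if total_bits % 2 ≠ 1 then ""   -- raise Exception("expect odd number of bits …")
  else
    String.ofList ((List.range (total_bits / 2)).map
      (fun i => nucleotide (PySem.Int.band (up2bit_value >>> (2 * i : Nat)) 3)))

-- ===== PRECONDITION & SPEC =====
-- exactly where the Python A returns: it raises on an even bit length (hence also on zero)
-- and loops forever on negative values of odd bit length, so Pre_ is the positive odd-bit-length ints
def Pre_up2bit_decode (up2bit_value : Int) : Prop :=
  0 < up2bit_value ∧ PySem.Int.bitLength up2bit_value % 2 = 1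
instance (up2bit_value : Int) : Decidable (Pre_up2bit_decode up2bit_value) := by
  unfold Pre_up2bit_decode; infer_instance
def pvWitness_up2bit_decode : Int := 22

def Spec_up2bit_decode (up2bit_value : Int) (out : String) : Prop := out = up2bit_decode_alt up2bit_value
instance (up2bit_value : Int) (out : String) : Decidable (Spec_up2bit_decode up2bit_value out) := by unfold Spec_up2bit_decode; infer_instance

-- ===== CLAIM (what is proved, stated in full; the proofs are below) =====
def Claim_equal_up2bit_decode : Prop := ∀ (up2bit_value : Int), Dom_up2bit_decode up2bit_value → Pre_up2bit_decode up2bit_value → Spec_up2bit_decode up2bit_value (up2bit_decode up2bit_value)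

-- ===== LEMMAS AND PROOFS =====

lemma nat_and_three (n : Nat) : n &&& 3 = n % 4 := by
  have := Nat.and_two_pow_sub_one_eq_mod n 2
  norm_num at this; omega

lemma cast_shiftRight (n k : Nat) : (↑n : Int) >>> k = ↑(n >>> k) := by
  simp [Int.shiftRight_eq_div_pow, Nat.shiftRight_eq_div_pow]

-- the A-loop on a positive n with 4^k ≤ n < 2·4^k runs exactly k+1 iterations, appending
-- the base-4 digits LSB-first; the last digit (the cap) is 1
lemma up2bitLoopA_eq (k : Nat) : ∀ (n : Nat), 4 ^ k ≤ n → n < 2 * 4 ^ k →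
    ∀ (res : List Char) (tw : Option Int),
    up2bitLoopA (k + 2) (↑n) res tw =
      (res ++ (List.range k).map (fun i => nucleotide ((n / 4 ^ i % 4 : Nat) : Int)) ++ [nucleotide 1],
       some 1) := by
  induction k with
  | zero =>
    intro n h1 h2 res tw
    have hn : n = 1 := by simp at h1 h2; omega
    subst hn
    simp [up2bitLoopA, show PySem.Int.band 1 3 = 1 from by decide,
          show (1 : Int) >>> (2 : Nat) = 0 from by decide]
  | succ k ih =>
    intro n h1 h2 res tw
    have hn4 : 4 ≤ n := le_trans (by calc (4:Nat) = 4 ^ 1 := by norm_num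
        _ ≤ 4 ^ (k+1) := Nat.pow_le_pow_right (by norm_num) (by omega)) h1
    have hne : (↑n : Int) ≠ 0 := by exact_mod_cast by omega
    have hband : PySem.Int.band (↑n) 3 = ((n % 4 : Nat) : Int) := by
      rw [show (3 : Int) = ((3 : Nat) : Int) from rfl, PySem.Int.band_natCast,
          nat_and_three]
    have hshift : (↑n : Int) >>> (2 : Nat) = ((n / 4 : Nat) : Int) := by
      rw [cast_shiftRight]; norm_num [Nat.shiftRight_eq_div_pow]
    have hb1 : 4 ^ k ≤ n / 4 := Nat.le_div_iff_mul_le (by norm_num) |>.mpr (by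
      calc 4 ^ k * 4 = 4 ^ (k + 1) := by ring
        _ ≤ n := h1)
    have hb2 : n / 4 < 2 * 4 ^ k := Nat.div_lt_iff_lt_mul (by norm_num) |>.mpr (by
      calc n < 2 * 4 ^ (k + 1) := h2
        _ = 2 * 4 ^ k * 4 := by ring)
    have step : ∀ (f : Nat) (r : Int) (res : List Char) (tw : Option Int),
        up2bitLoopA (f + 1) r res tw =
          if r ≠ 0 then
            up2bitLoopA f (r >>> (2 : Nat))
              (res ++ [nucleotide (PySem.Int.band r 3)]) (some (PySem.Int.band r 3))
          else (res, tw) := fun _ _ _ _ => rfl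
    show up2bitLoopA ((k + 2) + 1) (↑n) res tw = _
    rw [step, if_pos hne, hband, hshift, ih (n / 4) hb1 hb2]
    rw [List.range_succ_eq_map, List.map_cons, List.map_map]
    simp only [pow_zero, Nat.div_one, List.append_assoc, List.cons_append,
      List.nil_append]
    simp only [Prod.mk.injEq, and_true, List.append_right_inj, List.cons.injEq,
      true_and, List.append_left_inj]
    apply List.map_congr_left
    intro i _
    simp only [Function.comp_apply]
    congr 2
    rw [Nat.div_div_eq_div_mul, pow_succ]
    ring_nf

theorem up2bit_decode_spec : Claim_equal_up2bit_decode := by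
  intro v hdom hpre
  obtain ⟨hv, hodd⟩ := hpre
  obtain ⟨n, rfl⟩ : ∃ n : Nat, v = ↑n := ⟨v.toNat, (Int.toNat_of_nonneg hv.le).symm⟩
  have hn0 : 0 < n := by exact_mod_cast hv
  obtain ⟨L, hL⟩ : ∃ L, PySem.Int.bitLength (↑n : Int) = L := ⟨_, rfl⟩
  rw [hL] at hodd
  have hub : n < 2 ^ L := by
    have := PySem.Int.lt_two_pow_bitLength (↑n : Int); rw [hL] at this; simpa using this
  have hlb : 2 ^ (L - 1) ≤ n := by
    have := PySem.Int.two_pow_bitLength_le (↑n : Int) (by exact_mod_cast hn0.ne')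
    rw [hL] at this; simpa using this
  obtain ⟨k, hk⟩ : ∃ k, L = 2 * k + 1 := ⟨L / 2, by omega⟩
  have h1 : 4 ^ k ≤ n := by
    have : (2 : Nat) ^ (2 * k) ≤ n := by rw [hk] at hlb; simpa using hlb
    calc 4 ^ k = 2 ^ (2 * k) := by rw [pow_mul]; norm_num
      _ ≤ n := this
  have h2 : n < 2 * 4 ^ k := by
    calc n < 2 ^ L := hub
      _ = 2 * 4 ^ k := by rw [hk, pow_succ, pow_mul]; ring
  show up2bit_decode _ = up2bit_decode_alt _
  unfold up2bit_decode up2bit_decode_alt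
  dsimp only
  simp only [hL]
  have hcond : ¬ (L % 2 ≠ 1) := by omega
  rw [if_neg hcond, if_neg hcond]
  have hfuel : L / 2 + 2 = k + 2 := by omega
  rw [hfuel, up2bitLoopA_eq k n h1 h2 [] none]
  rw [if_neg (by simp)]
  have hk2 : L / 2 = k := by omega
  rw [hk2]
  simp only [List.nil_append, List.dropLast_concat]
  congr 1
  apply List.map_congr_left
  intro i _
  congr 1
  rw [show ((↑n : Int) >>> (2 * i : Nat)) = ((n >>> (2 * i) : Nat) : Int) from
      cast_shiftRight n (2 * i),
    show (3 : Int) = ((3 : Nat) : Int) from rfl, PySem.Int.band_natCast,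
    nat_and_three, Nat.shiftRight_eq_div_pow, pow_mul]
  norm_num
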